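-- pv_equiv track=rewrite | github.com/krmckone/Google-Tech-Practices | matchWords.py | findLongest
-- ===== SOURCE A (Python) =====
-- def findLongest(matchWord, inputList):
--
--     matchList = []
--
--     for word in inputList:
--         result = ""
--         n = 0
--         index = 0
--         while n < len(word) and index < len(matchWord):
--         # Avoid running out of bounds
--                 if matchWord[index] == word[n]:
--                     result = result + word[n]
--                     n = n + 1
--                     # Update the result builder and move on to the next letter
--                     # in both words
--                     index = index + 1
--                 else:
--                     index = index + 1
--                     # No match; move forward in the matcher string
--         if result == word:
--             matchList.append(result)
--             # Matched a full word
--     return matchList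
-- ===== SOURCE B (Python) =====
-- def findLongest(matchWord, inputList):
--     def isSub(word):
--         it = iter(matchWord)
--         return all(ch in it for ch in word)
--     return [w for w in inputList if isSub(w)]
-- ===== Notes on version B (the rewrite author's own statement) =====
-- stated objective: idiomatic
-- what changed: Replaced A's manual while-loop with index bookkeeping and string rebuilding per word by the idiomatic iterator-based subsequence test (it = iter(matchWord); all(ch in it for ch in word)) inside a list comprehension.
import Mathlib
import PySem

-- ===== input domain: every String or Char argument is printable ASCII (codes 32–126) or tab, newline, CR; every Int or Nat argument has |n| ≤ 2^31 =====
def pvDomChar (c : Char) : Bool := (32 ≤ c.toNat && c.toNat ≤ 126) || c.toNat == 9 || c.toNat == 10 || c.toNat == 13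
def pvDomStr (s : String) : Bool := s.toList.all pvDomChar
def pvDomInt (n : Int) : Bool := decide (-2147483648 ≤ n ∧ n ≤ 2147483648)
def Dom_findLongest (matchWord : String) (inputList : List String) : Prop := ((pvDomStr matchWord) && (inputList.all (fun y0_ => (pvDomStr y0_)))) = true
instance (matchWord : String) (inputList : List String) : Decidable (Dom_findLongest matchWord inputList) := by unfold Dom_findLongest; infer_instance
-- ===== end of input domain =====

-- B is the idiomatic iterator-based subsequence filter; same asymptotic cost, plainer code.

-- ===== PORT A =====
-- A's inner while loop over (result, n, index): the remaining suffixes matchWord[index:]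
-- and word[n:] are the loop state, `res` accumulates the built string.
def aLoop (m : List Char) (w : List Char) (res : List Char) : List Char :=
  match m, w with
  | _, [] => res
  | [], _ => res
  | x :: m', c :: w' => if x == c then aLoop m' w' (res ++ [c]) else aLoop m' (c :: w') res

def findLongest (matchWord : String) (inputList : List String) : List String :=
  inputList.foldl
    (fun matchList word =>
      let result := String.ofList (aLoop matchWord.toList word.toList [])
      if result == word then matchList ++ [result] else matchList)
    []

-- ===== PORT B =====
-- `ch in it` on an iterator: consume until ch is found, return the leftover iterator state.
def chInIt (c : Char) (m : List Char) : Bool × List Char :=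
  match m with
  | [] => (false, [])
  | x :: rest => if x == c then (true, rest) else chInIt c rest

-- all(ch in it for ch in word)
def allInIt (w : List Char) (m : List Char) : Bool :=
  match w with
  | [] => true
  | c :: w' =>
    let p := chInIt c m
    p.1 && allInIt w' p.2

def findLongest_alt (matchWord : String) (inputList : List String) : List String :=
  inputList.filter (fun w => allInIt w.toList matchWord.toList)

-- ===== PRECONDITION & SPEC =====
def Spec_findLongest (matchWord : String) (inputList : List String) (out : List String) : Prop := out = findLongest_alt matchWord inputList
instance (matchWord : String) (inputList : List String) (out : List String) : Decidable (Spec_findLongest matchWord inputList out) := by unfold Spec_findLongest; infer_instance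

-- ===== CLAIM (what is proved, stated in full; the proofs are below) =====
def Claim_equal_findLongest : Prop := ∀ (matchWord : String) (inputList : List String), Dom_findLongest matchWord inputList → Spec_findLongest matchWord inputList (findLongest matchWord inputList)

-- ===== LEMMAS AND PROOFS =====

theorem aLoop_acc (m w res : List Char) : aLoop m w res = res ++ aLoop m w [] := by
  induction m generalizing w res with
  | nil => cases w <;> simp [aLoop]
  | cons x m' ih =>
    cases w with
    | nil => simp [aLoop]
    | cons c w' =>
      by_cases h : x == c
      · simp only [aLoop, h, if_pos]
        rw [ih w' (res ++ [c])]
        conv_rhs => rw [ih w' ([] ++ [c])]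
        simp
      · simp only [aLoop, h, if_neg, Bool.false_eq_true, not_false_iff]
        exact ih (c :: w') res

-- A's greedy scan matches the whole word iff B's iterator check succeeds.
theorem aLoop_eq_iff (m w : List Char) : (aLoop m w [] = w) ↔ allInIt w m = true := by
  induction m generalizing w with
  | nil =>
    cases w with
    | nil => simp [aLoop, allInIt]
    | cons c w' => simp [aLoop, allInIt, chInIt]
  | cons x m' ih =>
    cases w with
    | nil => simp [aLoop, allInIt]
    | cons c w' =>
      by_cases h : x == c
      · have hc : x = c := by simpa using h
        simp only [aLoop, if_pos, allInIt, chInIt, hc, beq_self_eq_true,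
          Bool.true_and]
        rw [aLoop_acc m' w' ([] ++ [c])]
        constructor
        · intro he
          have : aLoop m' w' [] = w' := by simpa using he
          exact (ih w').mp this
        · intro hb
          have : aLoop m' w' [] = w' := (ih w').mpr hb
          simp [this]
      · simp only [aLoop, h, if_neg, Bool.false_eq_true, not_false_iff, allInIt, chInIt]
        exact ih (c :: w')

theorem findLongest_foldl (matchWord : String) (inputList : List String) (acc : List String) :
    inputList.foldl
      (fun matchList word =>
        let result := String.ofList (aLoop matchWord.toList word.toList [])
        if result == word then matchList ++ [result] else matchList)
      acc
    = acc ++ inputList.filter (fun w => allInIt w.toList matchWord.toList) := by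
  induction inputList generalizing acc with
  | nil => simp
  | cons w ws ih =>
    simp only [List.foldl_cons, List.filter_cons]
    by_cases hb : allInIt w.toList matchWord.toList = true
    · have ha : aLoop matchWord.toList w.toList [] = w.toList :=
        (aLoop_eq_iff matchWord.toList w.toList).mpr hb
      have hs : String.ofList (aLoop matchWord.toList w.toList []) = w := by
        rw [ha]; exact String.ofList_toList
      simp only [hs, beq_self_eq_true, if_true, hb, ih]
      simp
    · have hs : ¬ String.ofList (aLoop matchWord.toList w.toList []) = w := by
        intro he
        apply hb
        apply (aLoop_eq_iff matchWord.toList w.toList).mp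
        have := congrArg String.toList he
        simpa using this
      have hbe : (String.ofList (aLoop matchWord.toList w.toList []) == w) = false := by
        simpa using hs
      simp only [hbe, Bool.false_eq_true, if_false, hb, ih]

-- ===== VERDICT (by name: the statement is the Claim_ definition above) =====
theorem findLongest_spec : Claim_equal_findLongest := by
  intro matchWord inputList _
  unfold Spec_findLongest findLongest findLongest_alt
  simpa using findLongest_foldl matchWord inputList []
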